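-- pv_equiv track=rewrite | github.com/StoianBodurov/SoftUni | Python/Advanced/00-Exams/24_october_2020/2_checkmate.py | vertical_quin_place
-- ===== SOURCE A (Python) =====
-- def vertical_quin_place(matrix, king_row, king_column):
--     coordinates = []
--
--     for row_i in range(king_row, len(matrix)):
--         if matrix[row_i][king_column] == 'Q':
--             coordinates.append([row_i, king_column])
--             break
--
--     for row_i in range(king_row, -1, -1):
--         if matrix[row_i][king_column] == 'Q':
--             coordinates.append([row_i, king_column])
--             break
--
--     if len(coordinates) > 0:
--         return coordinates
-- ===== SOURCE B (Python) =====
-- def vertical_quin_place(matrix, king_row, king_column):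
--     qs = [r for r in range(len(matrix)) if matrix[r][king_column] == 'Q']
--     below = [r for r in qs if r >= king_row]
--     above = [r for r in qs if r <= king_row]
--     coordinates = []
--     if below:
--         coordinates.append([below[0], king_column])
--     if above:
--         coordinates.append([above[-1], king_column])
--     if coordinates:
--         return coordinates
-- ===== Notes on version B (the rewrite author's own statement) =====
-- stated objective: simpler
-- what changed: Replaces A's two directional break-loops with one full-column scan collecting all queen rows, from which the nearest queen at-or-below (first of the filtered list) and at-or-above (last of the filtered list) are read off.
-- intended difference: For negative king_row with a queen among the rows Python's negative indices reach, A returns that queen with a negative row index (e.g. [[-1, 0]]) — a wraparound artefact — while B returns the nearest queen at or below the king with its actual row index, the intended coordinates. — e.g. on vertical_quin_place([["Q"]], -1, 0): A returns some [[-1, 0]], B returns some [[0, 0]]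
-- outside the precondition, e.g. on vertical_quin_place([[''], ['Q', 'Q']], 1, 1): A returns [[1, 1], [1, 1]], B raises IndexError
import Mathlib
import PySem

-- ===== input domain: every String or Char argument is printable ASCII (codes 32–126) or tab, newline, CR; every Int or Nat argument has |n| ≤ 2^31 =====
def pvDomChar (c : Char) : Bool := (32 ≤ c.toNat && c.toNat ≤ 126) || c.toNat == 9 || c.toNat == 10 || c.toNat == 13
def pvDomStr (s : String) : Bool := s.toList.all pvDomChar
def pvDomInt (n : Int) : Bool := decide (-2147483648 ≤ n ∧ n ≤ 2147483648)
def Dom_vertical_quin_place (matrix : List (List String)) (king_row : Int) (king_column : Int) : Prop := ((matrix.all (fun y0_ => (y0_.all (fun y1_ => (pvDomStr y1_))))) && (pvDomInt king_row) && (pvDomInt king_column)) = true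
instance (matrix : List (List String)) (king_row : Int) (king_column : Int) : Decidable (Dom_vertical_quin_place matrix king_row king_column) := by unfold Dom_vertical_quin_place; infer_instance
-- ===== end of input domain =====

-- B replaces A's two directional break-loops by one scan of the whole column; objective: simpler.

-- ===== PORT A =====
-- matrix[r][c] (Python indexing, negative indices wrap); none = IndexError
def pvCell (matrix : List (List String)) (r c : Int) : Option String :=
  (PySem.List.pyGet? matrix r).bind (fun row => PySem.List.pyGet? row c)

-- A's for-loop with break: first row index in the range whose cell is 'Q'
def pvScan (matrix : List (List String)) (c : Int) : List Int → Option Int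
  | [] => none
  | r :: rs => if pvCell matrix r c = some "Q" then some r else pvScan matrix c rs

def vertical_quin_place (matrix : List (List String)) (king_row : Int) (king_column : Int) : Option (List (List Int)) :=
  let c1 : List (List Int) :=
    match pvScan matrix king_column (PySem.List.pyRange king_row (matrix.length : Int) 1) with
    | some r => [[r, king_column]]
    | none => []
  let c2 : List (List Int) :=
    match pvScan matrix king_column (PySem.List.pyRange king_row (-1) (-1)) with
    | some r => [[r, king_column]]
    | none => []
  let coordinates := c1 ++ c2
  if coordinates.length > 0 then some coordinates else none

-- ===== PORT B =====
def vertical_quin_place_alt (matrix : List (List String)) (king_row : Int) (king_column : Int) : Option (List (List Int)) :=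
  let qs : List Int :=
    (PySem.List.pyRange 0 (matrix.length : Int) 1).filter
      (fun r => pvCell matrix r king_column = some "Q")
  let below := qs.filter (fun r => king_row ≤ r)
  let above := qs.filter (fun r => r ≤ king_row)
  let coordinates : List (List Int) :=
    (match below.head? with | some r => [[r, king_column]] | none => []) ++
    (match above.getLast? with | some r => [[r, king_column]] | none => [])
  if coordinates ≠ [] then some coordinates else none

-- ===== PRECONDITION & SPEC =====
-- Pre_ is the inputs where A returns and every cell read is defined: the king's row index reachable by
-- Python indexing (-len(matrix) ≤ king_row < len(matrix); outside it A raises IndexError) and the column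
-- index valid in every row (on a matrix with a short row A may return while never inspecting it, but B
-- scans the whole column and raises IndexError there, so those inputs are excluded).
def Pre_vertical_quin_place (matrix : List (List String)) (king_row : Int) (king_column : Int) : Prop :=
  -(matrix.length : Int) ≤ king_row ∧ king_row < (matrix.length : Int) ∧
  ∀ row ∈ matrix, (PySem.List.pyGet? row king_column).isSome = true
instance (matrix : List (List String)) (king_row : Int) (king_column : Int) : Decidable (Pre_vertical_quin_place matrix king_row king_column) := by unfold Pre_vertical_quin_place; infer_instance

def pvWitness_vertical_quin_place : List (List String) × Int × Int := ([["Q"], ["."]], 1, 0)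

-- For negative king_row with a queen in the rows Python's negative indices reach, A reports that queen
-- with a negative row index (e.g. [[-1, 0]]) — a wraparound artefact — while B reports the nearest queen
-- at or below the king with its actual row index, the intended coordinates.
def D_vertical_quin_place (matrix : List (List String)) (king_row : Int) (king_column : Int) : Prop :=
  king_row < 0 ∧ ∃ row ∈ matrix.drop (((matrix.length : Int) + king_row).toNat),
    PySem.List.pyGet? row king_column = some "Q"
instance (matrix : List (List String)) (king_row : Int) (king_column : Int) : Decidable (D_vertical_quin_place matrix king_row king_column) := by unfold D_vertical_quin_place; infer_instance

def Spec_vertical_quin_place (matrix : List (List String)) (king_row : Int) (king_column : Int) (out : Option (List (List Int))) : Prop := ¬ D_vertical_quin_place matrix king_row king_column → out = vertical_quin_place_alt matrix king_row king_column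
instance (matrix : List (List String)) (king_row : Int) (king_column : Int) (out : Option (List (List Int))) : Decidable (Spec_vertical_quin_place matrix king_row king_column out) := by unfold Spec_vertical_quin_place; infer_instance

def pvDiffWitness_vertical_quin_place : List (List String) × Int × Int := ([["Q"]], -1, 0)
def pvDiffWitnessOut_vertical_quin_place : (Option (List (List Int))) × (Option (List (List Int))) := (some [[-1, 0]], some [[0, 0]])

-- ===== CLAIM (what is proved, stated in full; the proofs are below) =====
def Claim_unchanged_vertical_quin_place : Prop := ∀ (matrix : List (List String)) (king_row : Int) (king_column : Int), Dom_vertical_quin_place matrix king_row king_column → Pre_vertical_quin_place matrix king_row king_column → Spec_vertical_quin_place matrix king_row king_column (vertical_quin_place matrix king_row king_column)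
def Claim_changed_vertical_quin_place : Prop := Dom_vertical_quin_place (pvDiffWitness_vertical_quin_place.1) (pvDiffWitness_vertical_quin_place.2.1) (pvDiffWitness_vertical_quin_place.2.2) ∧ Pre_vertical_quin_place (pvDiffWitness_vertical_quin_place.1) (pvDiffWitness_vertical_quin_place.2.1) (pvDiffWitness_vertical_quin_place.2.2) ∧ D_vertical_quin_place (pvDiffWitness_vertical_quin_place.1) (pvDiffWitness_vertical_quin_place.2.1) (pvDiffWitness_vertical_quin_place.2.2) ∧ vertical_quin_place (pvDiffWitness_vertical_quin_place.1) (pvDiffWitness_vertical_quin_place.2.1) (pvDiffWitness_vertical_quin_place.2.2) = pvDiffWitnessOut_vertical_quin_place.1 ∧ vertical_quin_place_alt (pvDiffWitness_vertical_quin_place.1) (pvDiffWitness_vertical_quin_place.2.1) (pvDiffWitness_vertical_quin_place.2.2) = pvDiffWitnessOut_vertical_quin_place.2 ∧ pvDiffWitnessOut_vertical_quin_place.1 ≠ pvDiffWitnessOut_vertical_quin_place.2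
def Claim_exact_vertical_quin_place : Prop := ∀ (matrix : List (List String)) (king_row : Int) (king_column : Int), Dom_vertical_quin_place matrix king_row king_column → Pre_vertical_quin_place matrix king_row king_column → D_vertical_quin_place matrix king_row king_column → vertical_quin_place matrix king_row king_column ≠ vertical_quin_place_alt matrix king_row king_column

-- ===== LEMMAS AND PROOFS =====

-- A break-loop is head? of the filtered list
theorem pvScan_eq_head_filter (matrix : List (List String)) (c : Int) (l : List Int) :
    pvScan matrix c l = (l.filter (fun r => pvCell matrix r c = some "Q")).head? := by
  induction l with
  | nil => rfl
  | cons r rs ih =>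
    by_cases h : pvCell matrix r c = some "Q" <;>
      simp [pvScan, h, ih]

theorem filter_ge_pyRange (n kr : Int) (h0 : 0 ≤ kr) (h1 : kr ≤ n) :
    (PySem.List.pyRange 0 n 1).filter (fun r => decide (kr ≤ r)) = PySem.List.pyRange kr n 1 := by
  rw [PySem.List.pyRange_one_append 0 kr n h0 h1, List.filter_append]
  have h2 : (PySem.List.pyRange 0 kr 1).filter (fun r => decide (kr ≤ r)) = [] := by
    rw [List.filter_eq_nil_iff]
    intro x hx
    have := (PySem.List.mem_pyRange_one.mp hx).2
    simpa using by omega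
  have h3 : (PySem.List.pyRange kr n 1).filter (fun r => decide (kr ≤ r)) = PySem.List.pyRange kr n 1 := by
    rw [List.filter_eq_self]
    intro x hx
    have := (PySem.List.mem_pyRange_one.mp hx).1
    simpa using this
  rw [h2, h3, List.nil_append]

theorem filter_le_pyRange (n kr : Int) (h0 : 0 ≤ kr) (h1 : kr < n) :
    (PySem.List.pyRange 0 n 1).filter (fun r => decide (r ≤ kr)) = PySem.List.pyRange 0 (kr + 1) 1 := by
  rw [PySem.List.pyRange_one_append 0 (kr + 1) n (by omega) (by omega), List.filter_append]
  have h2 : (PySem.List.pyRange 0 (kr + 1) 1).filter (fun r => decide (r ≤ kr)) = PySem.List.pyRange 0 (kr + 1) 1 := by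
    rw [List.filter_eq_self]
    intro x hx
    have := (PySem.List.mem_pyRange_one.mp hx).2
    simpa using by omega
  have h3 : (PySem.List.pyRange (kr + 1) n 1).filter (fun r => decide (r ≤ kr)) = [] := by
    rw [List.filter_eq_nil_iff]
    intro x hx
    have := (PySem.List.mem_pyRange_one.mp hx).1
    simpa using by omega
  rw [h2, h3, List.append_nil]

-- every queen index found by the full scan is a real (nonnegative) row index
theorem mem_qs_nonneg (matrix : List (List String)) (c n x : Int)
    (hx : x ∈ (PySem.List.pyRange 0 n 1).filter (fun r => pvCell matrix r c = some "Q")) : 0 ≤ x := by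
  have := (PySem.List.mem_pyRange_one.mp (List.mem_of_mem_filter hx)).1
  exact this

-- a negative in-range index reads the element counted from the end
theorem pvGet_wrap {α : Type} (xs : List α) (r : Int)
    (h1 : -(xs.length : Int) ≤ r) (h2 : r < 0) :
    PySem.List.pyGet? xs r = xs[((xs.length : Int) + r).toNat]? := by
  simp only [PySem.List.pyGet?, PySem.List.pyIdx?]
  rw [if_neg (by omega), if_pos (by omega)]
  show xs[xs.length - (-r).toNat]? = xs[((xs.length : Int) + r).toNat]?
  congr 1
  omega

-- D_'s "queen in the last -king_row rows" is exactly "queen at a wrapped index A's first loop passes"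
theorem D_iff_range (matrix : List (List String)) (kr kc : Int)
    (hlo : -(matrix.length : Int) ≤ kr) (hk : kr < 0) :
    (∃ row ∈ matrix.drop (((matrix.length : Int) + kr).toNat),
        PySem.List.pyGet? row kc = some "Q")
      ↔ ∃ r ∈ PySem.List.pyRange kr 0 1, pvCell matrix r kc = some "Q" := by
  constructor
  · rintro ⟨row, hmem, hQ⟩
    obtain ⟨j, hj, hrow⟩ := List.getElem_of_mem hmem
    rw [List.getElem_drop] at hrow
    have hjlen : ((matrix.length : Int) + kr).toNat + j < matrix.length := by
      have := List.length_drop (i := ((matrix.length : Int) + kr).toNat) (l := matrix)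
      omega
    refine ⟨kr + j, ?_, ?_⟩
    · rw [PySem.List.mem_pyRange_one]
      have := List.length_drop (i := ((matrix.length : Int) + kr).toNat) (l := matrix)
      constructor <;> omega
    · show (PySem.List.pyGet? matrix (kr + j)).bind (fun row => PySem.List.pyGet? row kc) = some "Q"
      rw [pvGet_wrap matrix (kr + j) (by omega) (by omega)]
      have hidx : (((matrix.length : Int) + (kr + (j : Int))).toNat) = ((matrix.length : Int) + kr).toNat + j := by
        omega
      rw [hidx, List.getElem?_eq_getElem hjlen, hrow]
      simpa using hQ
  · rintro ⟨r, hr, hQ⟩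
    rw [PySem.List.mem_pyRange_one] at hr
    have hQ' : (PySem.List.pyGet? matrix r).bind (fun row => PySem.List.pyGet? row kc) = some "Q" := hQ
    rw [pvGet_wrap matrix r (by omega) hr.2] at hQ'
    have hi : ((matrix.length : Int) + r).toNat < matrix.length := by omega
    rw [List.getElem?_eq_getElem hi] at hQ'
    simp only [Option.bind_some] at hQ'
    refine ⟨matrix[((matrix.length : Int) + r).toNat], ?_, hQ'⟩
    have hj : ((matrix.length : Int) + r).toNat - ((matrix.length : Int) + kr).toNat
        < (matrix.drop (((matrix.length : Int) + kr).toNat)).length := by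
      have := List.length_drop (i := ((matrix.length : Int) + kr).toNat) (l := matrix)
      omega
    have : (matrix.drop (((matrix.length : Int) + kr).toNat))[((matrix.length : Int) + r).toNat - ((matrix.length : Int) + kr).toNat]'hj = matrix[((matrix.length : Int) + r).toNat] := by
      rw [List.getElem_drop]
      congr 1
      omega
    rw [← this]
    exact List.getElem_mem hj

-- for a king above the board the queen list is untouched by B's directional filters
theorem filter_ge_qs_neg (matrix : List (List String)) (c n kr : Int) (hk : kr < 0) :
    ((PySem.List.pyRange 0 n 1).filter (fun r => pvCell matrix r c = some "Q")).filter
      (fun r => decide (kr ≤ r)) = (PySem.List.pyRange 0 n 1).filter (fun r => pvCell matrix r c = some "Q") := by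
  rw [List.filter_eq_self]
  intro x hx
  have := mem_qs_nonneg matrix c n x hx
  simpa using by omega

theorem filter_le_qs_neg (matrix : List (List String)) (c n kr : Int) (hk : kr < 0) :
    ((PySem.List.pyRange 0 n 1).filter (fun r => pvCell matrix r c = some "Q")).filter
      (fun r => decide (r ≤ kr)) = [] := by
  rw [List.filter_eq_nil_iff]
  intro x hx
  have := mem_qs_nonneg matrix c n x hx
  simpa using by omega

-- ===== VERDICT (by name: the statement is the Claim_ definition above) =====
theorem vertical_quin_place_spec : Claim_unchanged_vertical_quin_place := by
  intro matrix king_row king_column _ hpre hnd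
  obtain ⟨hlo, hhi, -⟩ := hpre
  unfold vertical_quin_place vertical_quin_place_alt
  by_cases hk : 0 ≤ king_row
  · -- king on the board: A's two scans are B's head?/getLast? of the directional filters
    have e1 : pvScan matrix king_column (PySem.List.pyRange king_row (matrix.length : Int) 1)
        = (((PySem.List.pyRange 0 (matrix.length : Int) 1).filter
              (fun r => pvCell matrix r king_column = some "Q")).filter
            (fun r => decide (king_row ≤ r))).head? := by
      rw [pvScan_eq_head_filter, List.filter_comm,
        filter_ge_pyRange (matrix.length : Int) king_row hk (by omega)]
    have e2 : pvScan matrix king_column (PySem.List.pyRange king_row (-1) (-1))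
        = (((PySem.List.pyRange 0 (matrix.length : Int) 1).filter
              (fun r => pvCell matrix r king_column = some "Q")).filter
            (fun r => decide (r ≤ king_row))).getLast? := by
      rw [pvScan_eq_head_filter, PySem.List.pyRange_neg_one_eq_reverse, List.filter_reverse,
        List.head?_reverse, List.filter_comm,
        filter_le_pyRange (matrix.length : Int) king_row hk hhi]
      norm_num
    simp only [e1, e2]
    set b := (((PySem.List.pyRange 0 (matrix.length : Int) 1).filter
        (fun r => pvCell matrix r king_column = some "Q")).filter
        (fun r => decide (king_row ≤ r))).head?
    set a := (((PySem.List.pyRange 0 (matrix.length : Int) 1).filter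
        (fun r => pvCell matrix r king_column = some "Q")).filter
        (fun r => decide (r ≤ king_row))).getLast?
    cases b <;> cases a <;> simp
  · -- king at a negative index, no queen in the wrapped rows (¬ D_):
    rw [not_le] at hk
    have hnoq : ∀ r ∈ PySem.List.pyRange king_row 0 1,
        ¬ pvCell matrix r king_column = some "Q" := by
      intro r hr hq
      exact hnd ⟨hk, (D_iff_range matrix king_row king_column hlo hk).mpr ⟨r, hr, hq⟩⟩
    have e1 : pvScan matrix king_column (PySem.List.pyRange king_row (matrix.length : Int) 1)
        = ((PySem.List.pyRange 0 (matrix.length : Int) 1).filter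
            (fun r => pvCell matrix r king_column = some "Q")).head? := by
      rw [pvScan_eq_head_filter,
        PySem.List.pyRange_one_append king_row 0 (matrix.length : Int) (by omega) (by positivity),
        List.filter_append]
      have h2 : (PySem.List.pyRange king_row 0 1).filter
          (fun r => pvCell matrix r king_column = some "Q") = [] := by
        rw [List.filter_eq_nil_iff]
        intro x hx
        simpa using hnoq x hx
      rw [h2, List.nil_append]
    have e2 : pvScan matrix king_column (PySem.List.pyRange king_row (-1) (-1)) = none := by
      rw [PySem.List.pyRange_neg_one_eq_nil (by omega)]
      rfl
    simp only [e1, e2, filter_ge_qs_neg matrix king_column (matrix.length : Int) king_row hk,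
      filter_le_qs_neg matrix king_column (matrix.length : Int) king_row hk]
    cases ((PySem.List.pyRange 0 (matrix.length : Int) 1).filter
        (fun r => pvCell matrix r king_column = some "Q")).head? <;> simp

theorem vertical_quin_place_changed : Claim_changed_vertical_quin_place := by
  unfold Claim_changed_vertical_quin_place; decide

theorem vertical_quin_place_tight : Claim_exact_vertical_quin_place := by
  intro matrix king_row king_column _ hpre hd heq
  obtain ⟨hlo, -, -⟩ := hpre
  obtain ⟨hk, hex⟩ := hd
  obtain ⟨r, hrmem, hq'⟩ := (D_iff_range matrix king_row king_column hlo hk).mp hex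
  unfold vertical_quin_place vertical_quin_place_alt at heq
  -- A's first scan finds a wrapped (negative) index
  have e2 : pvScan matrix king_column (PySem.List.pyRange king_row (-1) (-1)) = none := by
    rw [PySem.List.pyRange_neg_one_eq_nil (by omega)]
    rfl
  have hsplit : pvScan matrix king_column (PySem.List.pyRange king_row (matrix.length : Int) 1)
      = ((PySem.List.pyRange king_row 0 1).filter
            (fun r => pvCell matrix r king_column = some "Q")
          ++ (PySem.List.pyRange 0 (matrix.length : Int) 1).filter
            (fun r => pvCell matrix r king_column = some "Q")).head? := by
    rw [pvScan_eq_head_filter,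
      PySem.List.pyRange_one_append king_row 0 (matrix.length : Int) (by omega) (by positivity),
      List.filter_append]
  have hrin : r ∈ (PySem.List.pyRange king_row 0 1).filter
      (fun r => pvCell matrix r king_column = some "Q") :=
    List.mem_filter.mpr ⟨hrmem, by simpa using hq'⟩
  obtain ⟨r0, l0, hcons⟩ : ∃ r0 l0, (PySem.List.pyRange king_row 0 1).filter
      (fun r => pvCell matrix r king_column = some "Q") = r0 :: l0 := by
    cases h : (PySem.List.pyRange king_row 0 1).filter
        (fun r => pvCell matrix r king_column = some "Q") with
    | nil => rw [h] at hrin; cases hrin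
    | cons a l => exact ⟨a, l, rfl⟩
  have hr0neg : r0 < 0 := by
    have : r0 ∈ (PySem.List.pyRange king_row 0 1).filter
        (fun r => pvCell matrix r king_column = some "Q") := by
      rw [hcons]; exact List.mem_cons_self
    exact (PySem.List.mem_pyRange_one.mp (List.mem_of_mem_filter this)).2
  rw [hcons] at hsplit
  simp only [List.cons_append, List.head?_cons] at hsplit
  -- B's directional filters: below is the whole queen list, above is empty
  simp only [e2, hsplit, filter_ge_qs_neg matrix king_column (matrix.length : Int) king_row hk,
    filter_le_qs_neg matrix king_column (matrix.length : Int) king_row hk] at heq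
  cases hqs : ((PySem.List.pyRange 0 (matrix.length : Int) 1).filter
      (fun r => pvCell matrix r king_column = some "Q")).head? with
  | none =>
    simp only [hqs] at heq
    simp at heq
  | some r1 =>
    have hr1 : 0 ≤ r1 := by
      have hm : r1 ∈ (PySem.List.pyRange 0 (matrix.length : Int) 1).filter
          (fun r => pvCell matrix r king_column = some "Q") := by
        cases h : (PySem.List.pyRange 0 (matrix.length : Int) 1).filter
            (fun r => pvCell matrix r king_column = some "Q") with
        | nil => rw [h] at hqs; cases hqs
        | cons a l =>
          rw [h] at hqs
          simp only [List.head?_cons, Option.some.injEq] at hqs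
          rw [hqs]; exact List.mem_cons_self
      exact mem_qs_nonneg matrix king_column (matrix.length : Int) r1 hm
    simp only [hqs] at heq
    simp at heq
    omega
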